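-- pv_equiv track=rewrite | github.com/mhihasan/advent-of-code | puzzles/year_2023/day14/solution.py | fn
-- ===== SOURCE A (Python) =====
-- def fn(line):
--     """
--     ('O', 'O', '.', 'O', '.', 'O', '.', '.', '#', '#')
--     ('.', '.', '.', 'O', 'O', '.', '.', '.', '.', 'O')
--     ('.', 'O', '.', '.', '.', '#', 'O', '.', '.', 'O')
--     ('.', 'O', '.', '#', '.', '.', '.', '.', '.', '.')
--     ('.', '#', '.', 'O', '.', '.', '.', '.', '.', '.')
--     ('#', '.', '#', '.', '.', 'O', '#', '.', '#', '#')
--     ('.', '.', '#', '.', '.', '.', 'O', '.', '#', '.')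
--     ('.', '.', '.', '.', 'O', '#', '.', 'O', '#', '.')
--     ('.', '.', '.', '.', '#', '.', '.', '.', '.', '.')
--     ('.', '#', '.', 'O', '.', '#', 'O', '.', '.', '.')
--
--
--      ('.', 'O', '.', '.', '.', '#', 'O', '.', '.', 'O')
--      ('.', '#', '.', 'O', '.', '#', 'O', '.', '.', '.')
--     """
--
--     for i, c in enumerate(line):
--         if c == "O":
--             j = i
--             while j > 0:
--                 if line[j - 1] != ".":
--                     break
--
--                 line[j - 1] = "O"
--                 line[j] = "."
--
--                 j -= 1
--
--     total = 0
--     length = len(line)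
--     for i, c in enumerate(line):
--         if c == "O":
--             total += length - i
--     return total
-- ===== SOURCE B (Python) =====
-- def fn(line):
--     total = 0
--     free = 0
--     n = len(line)
--     for i, c in enumerate(line):
--         if c == "O":
--             total += n - free
--             free += 1
--         elif c != ".":
--             free = i + 1
--     return total
-- ===== Notes on version B (the rewrite author's own statement) =====
-- stated objective: simpler
-- what changed: Replaces A's per-rock bubble-left while loop over a mutated list by a single pass that tracks the next free slot (reset after a blocker) and adds each rock's load immediately, without mutating the list.
import Mathlib
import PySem

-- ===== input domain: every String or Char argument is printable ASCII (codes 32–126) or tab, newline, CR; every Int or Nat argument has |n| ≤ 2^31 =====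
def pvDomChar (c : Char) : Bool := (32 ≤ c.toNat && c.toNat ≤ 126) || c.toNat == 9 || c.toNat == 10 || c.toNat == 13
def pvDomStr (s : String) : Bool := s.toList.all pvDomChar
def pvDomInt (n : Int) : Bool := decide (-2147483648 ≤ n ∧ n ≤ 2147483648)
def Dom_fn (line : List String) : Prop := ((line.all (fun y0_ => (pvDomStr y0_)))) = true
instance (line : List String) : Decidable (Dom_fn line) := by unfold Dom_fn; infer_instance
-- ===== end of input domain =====

-- B replaces A's per-rock bubble-left while loop by a single pass tracking the next free
-- slot (reset after a blocker), adding each rock's load immediately; A mutates its argument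
-- in place, B does not — the equivalence proved here is about the return value only.

-- ===== PORT A =====
-- the inner 'while j > 0: …' loop; indices read with getD "" (always in range when A runs it)
def fnWhile (cur : List String) (j : Nat) : List String :=
  if _h : 0 < j then
    if cur.getD (j - 1) "" ≠ "." then cur
    else fnWhile ((cur.set (j - 1) "O").set j ".") (j - 1)
  else cur
termination_by j
decreasing_by omega

-- one iteration of A's outer for-loop (the list is mutated while iterated, so the port
-- iterates over the indices and reads the live list, exactly as Python's list iterator does)
def fnStepA (cur : List String) (i : Nat) : List String :=
  if cur.getD i "" = "O" then fnWhile cur i else cur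

def fnSlide (line : List String) : List String :=
  (List.range line.length).foldl fnStepA line

-- one iteration of A's second loop: 'if c == "O": total += length - i'
def fnLoad (len : Int) (total : Int) (p : Int × String) : Int :=
  if p.2 = "O" then total + (len - p.1) else total

def fn (line : List String) : Int :=
  let cur := fnSlide line
  (PySem.List.enumerate cur).foldl (fnLoad (cur.length : Int)) 0

-- ===== PORT B =====
-- state (total, free); 'if c == "O": total += n - free; free += 1; elif c != ".": free = i + 1'
def fnAltStep (n : Int) (st : Int × Int) (p : Int × String) : Int × Int :=
  if p.2 = "O" then (st.1 + (n - st.2), st.2 + 1)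
  else if p.2 ≠ "." then (st.1, p.1 + 1)
  else st

def fn_alt (line : List String) : Int :=
  ((PySem.List.enumerate line).foldl (fnAltStep (line.length : Int)) (0, 0)).1

-- ===== PRECONDITION & SPEC =====
def Spec_fn (line : List String) (out : Int) : Prop := out = fn_alt line
instance (line : List String) (out : Int) : Decidable (Spec_fn line out) := by unfold Spec_fn; infer_instance

-- ===== CLAIM (what is proved, stated in full; the proofs are below) =====
def Claim_equal_fn : Prop := ∀ (line : List String), Dom_fn line → Spec_fn line (fn line)

-- ===== LEMMAS AND PROOFS =====

lemma getD_append_len (P l : List String) (m : Nat) (d : String) :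
    (P ++ l).getD (P.length + m) d = l.getD m d := by
  simp [List.getD, List.getElem?_append_right]

lemma set_append_len (P l : List String) (m : Nat) (v : String) :
    (P ++ l).set (P.length + m) v = P ++ l.set m v := by
  induction P with
  | nil => simp
  | cons a P ih =>
      simp only [List.cons_append, List.length_cons]
      rw [show P.length + 1 + m = (P.length + m) + 1 from by omega]
      simp [List.set, ih]

lemma load_no_O (len t : Int) (l : List (Int × String)) (h : ∀ p ∈ l, p.2 ≠ "O") :
    l.foldl (fnLoad len) t = t := by
  induction l generalizing t with
  | nil => rfl
  | cons p l ih =>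
      have hp := h p (List.mem_cons_self ..)
      simp only [List.foldl_cons, fnLoad, if_neg hp]
      exact ih t (fun q hq => h q (List.mem_cons_of_mem _ hq))

lemma while_bubble (d : Nat) (Q rest : List String)
    (hQ : ∀ x ∈ Q.getLast?, x ≠ ".") :
    fnWhile (Q ++ (List.replicate d "." ++ ("O" :: rest))) (Q.length + d)
      = Q ++ "O" :: (List.replicate d "." ++ rest) := by
  induction d generalizing rest with
  | zero =>
      rcases Q.eq_nil_or_concat with rfl | ⟨Q', x, rfl⟩
      · simp [fnWhile]
      · have hx : x ≠ "." := hQ x (by simp)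
        rw [fnWhile]
        have hget : ((Q' ++ [x]) ++ (List.replicate 0 "." ++ ("O" :: rest))).getD
            ((Q' ++ [x]).length + 0 - 1) "" = x := by
          have : (Q' ++ [x]) ++ (List.replicate 0 "." ++ ("O" :: rest))
              = Q' ++ (x :: ("O" :: rest)) := by simp
          rw [this]
          have := getD_append_len Q' (x :: ("O" :: rest)) 0 ""
          simpa using this
        simp [hget, hx]
  | succ d ih =>
      rw [fnWhile]
      have hlen : (Q ++ List.replicate d ".").length = Q.length + d := by simp
      have hform : Q ++ (List.replicate (d + 1) "." ++ ("O" :: rest))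
          = (Q ++ List.replicate d ".") ++ ("." :: ("O" :: rest)) := by
        rw [List.replicate_succ']; simp
      have hget : (Q ++ (List.replicate (d + 1) "." ++ ("O" :: rest))).getD
          (Q.length + (d + 1) - 1) "" = "." := by
        rw [hform]
        have := getD_append_len (Q ++ List.replicate d ".") ("." :: ("O" :: rest)) 0 ""
        simp only [hlen] at this
        simpa using this
      have hset : ((Q ++ (List.replicate (d + 1) "." ++ ("O" :: rest))).set
            (Q.length + (d + 1) - 1) "O").set (Q.length + (d + 1)) "."
          = Q ++ (List.replicate d "." ++ ("O" :: ("." :: rest))) := by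
        rw [hform]
        have h1 := set_append_len (Q ++ List.replicate d ".") ("." :: ("O" :: rest)) 0 "O"
        have h2 := set_append_len (Q ++ List.replicate d ".") ("O" :: ("O" :: rest)) 1 "."
        simp only [hlen] at h1 h2
        simp only [show Q.length + (d + 1) - 1 = Q.length + d + 0 by omega, h1]
        simp only [List.set] at *
        simpa [show Q.length + (d + 1) = Q.length + d + 1 by omega] using h2
      simp only [show (0:Nat) < Q.length + (d + 1) by omega, dif_pos, hget,
        ne_eq, not_true_eq_false, if_neg, not_false_eq_true, reduceIte, hset]
      have := ih ("." :: rest)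
      rw [show Q.length + (d + 1) - 1 = Q.length + d by omega, this]
      rw [List.replicate_succ']
      simp

lemma inv_main (line : List String) (k : Nat) (hk : k ≤ line.length) :
    ∃ Q d, (List.range k).foldl fnStepA line = Q ++ (List.replicate d "." ++ line.drop k)
      ∧ Q.length + d = k
      ∧ (∀ x ∈ Q.getLast?, x ≠ ".")
      ∧ (PySem.List.enumerate (line.take k)).foldl (fnAltStep (line.length : Int)) (0, 0)
          = ((PySem.List.enumerate Q).foldl (fnLoad (line.length : Int)) 0, (Q.length : Int)) := by
  induction k with
  | zero => exact ⟨[], 0, by simp, by simp, by simp, by simp [PySem.List.enumerate]⟩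
  | succ k ih =>
      have hk' : k < line.length := by omega
      obtain ⟨Q, d, hst, hlen, hlast, hB⟩ := ih (by omega)
      set n : Int := (line.length : Int) with hn
      obtain ⟨c, hdrop, htake⟩ :
          ∃ c, line.drop k = c :: line.drop (k + 1) ∧ line.take (k + 1) = line.take k ++ [c] :=
        ⟨line.get ⟨k, hk'⟩, List.drop_eq_getElem_cons hk',
          by rw [List.take_succ, List.getElem?_eq_getElem hk']; rfl⟩
      have htklen : (line.take k).length = k := by simp [Nat.min_eq_left (le_of_lt hk')]
      -- A's state before step k, with the k-th cell exposed
      have hst' : (List.range k).foldl fnStepA line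
          = (Q ++ List.replicate d ".") ++ (c :: line.drop (k + 1)) := by
        rw [hst, hdrop]; simp
      have hPlen : (Q ++ List.replicate d ".").length = k := by simp [hlen]
      have hgetc : ((List.range k).foldl fnStepA line).getD k "" = c := by
        rw [hst']
        have := getD_append_len (Q ++ List.replicate d ".") (c :: line.drop (k + 1)) 0 ""
        simp only [hPlen] at this; simpa using this
      have hstep : (List.range (k + 1)).foldl fnStepA line
          = fnStepA ((List.range k).foldl fnStepA line) k := by
        rw [List.range_succ, List.foldl_append]; rfl
      -- B's state after step k
      have hBstep : (PySem.List.enumerate (line.take (k + 1))).foldl (fnAltStep n) (0, 0)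
          = fnAltStep n ((PySem.List.enumerate Q).foldl (fnLoad n) 0, (Q.length : Int))
              ((k : Int), c) := by
        rw [htake, PySem.List.enumerate_append, List.foldl_append, hB, htklen]
        simp [PySem.List.enumerate]
      by_cases hO : c = "O"
      · -- rock: bubbles to the free slot
        refine ⟨Q ++ ["O"], d, ?_, by simp; omega, by simp, ?_⟩
        · rw [hstep, fnStepA, if_pos (by rw [hgetc, hO]), hst, hdrop, hO]
          have hw := while_bubble d Q (line.drop (k + 1)) hlast
          rw [show Q.length + d = k from hlen] at hw
          rw [hw]; simp
        · rw [hBstep, hO, fnAltStep]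
          simp only [ite_true, reduceIte]
          rw [PySem.List.enumerate_append, List.foldl_append]
          simp [PySem.List.enumerate, fnLoad]
      · by_cases hdot : c = "."
        · -- empty cell: nothing moves
          refine ⟨Q, d + 1, ?_, by omega, hlast, ?_⟩
          · rw [hstep, fnStepA, if_neg (by rw [hgetc]; exact fun h => hO h), hst, hdrop, hdot]
            rw [List.replicate_succ']; simp
          · rw [hBstep, hdot, fnAltStep]; simp
        · -- blocker: resets the free slot to i + 1
          have hno : ∀ p ∈ PySem.List.enumerate (List.replicate d "." ++ [c])
              ((0 : Int) + (Q.length : Int)), p.2 ≠ "O" := by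
            intro p hp
            obtain ⟨j, hj, rfl⟩ := (PySem.List.mem_enumerate_iff _ _ _).mp hp
            rcases List.mem_append.mp (List.getElem_mem hj) with h | h
            · have := List.eq_of_mem_replicate h
              simp [this]
            · simp only [List.mem_singleton] at h
              simp [h, hO]
          refine ⟨Q ++ (List.replicate d "." ++ [c]), 0, ?_, by simp; omega, ?_, ?_⟩
          · rw [hstep, fnStepA, if_neg (by rw [hgetc]; exact fun h => hO h), hst, hdrop]
            simp
          · intro x hx
            have hxc : x = c := by
              have heq : Q ++ (List.replicate d "." ++ [c]) = (Q ++ List.replicate d ".") ++ [c] := by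
                simp
              rw [heq, List.getLast?_concat] at hx
              simpa using hx.symm
            rw [hxc]; exact hdot
          · rw [hBstep, fnAltStep]
            simp only [hO, hdot, ite_false, ne_eq, not_false_eq_true, ite_true, reduceIte]
            rw [PySem.List.enumerate_append, List.foldl_append, load_no_O _ _ _ hno]
            have hql : (Q ++ (List.replicate d "." ++ [c])).length = k + 1 := by
              simp; omega
            refine Prod.ext rfl ?_
            rw [hql]
            push_cast
            ring

-- ===== VERDICT (by name: the statement is the Claim_ definition above) =====
theorem fn_spec : Claim_equal_fn := by
  intro line _
  unfold Spec_fn fn_alt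
  have hfn : fn line = (PySem.List.enumerate ((List.range line.length).foldl fnStepA line)).foldl
      (fnLoad ((((List.range line.length).foldl fnStepA line)).length : Int)) 0 := rfl
  rw [hfn]
  obtain ⟨Q, d, hst, hlen, _, hB⟩ := inv_main line line.length le_rfl
  simp only [List.drop_length, List.append_nil] at hst
  have hcurlen : ((List.range line.length).foldl fnStepA line).length = line.length := by
    rw [hst]; simp; omega
  rw [List.take_length] at hB
  rw [hB, hcurlen, hst, PySem.List.enumerate_append, List.foldl_append]
  rw [load_no_O]
  intro p hp
  obtain ⟨j, hj, rfl⟩ := (PySem.List.mem_enumerate_iff _ _ _).mp hp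
  have := List.eq_of_mem_replicate ((List.replicate d ".").getElem_mem hj)
  simp [this]
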